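-- pv_equiv track=rewrite | github.com/tanasovich/hillel-python-intro | lesson10/combinations.py | without_00
-- ===== SOURCE A (Python) =====
-- def without_00(a: int, b: int) -> int:
--     if a == 0:
--         return 1
--     if a == 1:
--         return b + 1
--     if a > 1 and b == 0:
--         return 0
--
--     return without_00(a - 1, b - 1) + without_00(a, b - 1)
-- ===== SOURCE B (Python) =====
-- def without_00(a: int, b: int) -> int:
--     # closed form: the recurrence is Pascal's rule, so the count is C(b+1, a)
--     if a == 0:
--         return 1
--     if a == 1:
--         return b + 1
--     if a < 0 or a > b + 1:
--         return 0
--     num = 1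
--     den = 1
--     for i in range(a):
--         num *= b + 1 - i
--         den *= i + 1
--     return num // den
-- ===== Notes on version B (the rewrite author's own statement) =====
-- stated objective: faster
-- what changed: replaces the exponential double recursion with the closed-form binomial coefficient C(b+1, a) computed by a single product loop; intended as asymptotically faster (a timing run saw A time out at n=16 where B returned, but both are too fast at the sizes A finishes to measure a ratio)
import Mathlib
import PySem

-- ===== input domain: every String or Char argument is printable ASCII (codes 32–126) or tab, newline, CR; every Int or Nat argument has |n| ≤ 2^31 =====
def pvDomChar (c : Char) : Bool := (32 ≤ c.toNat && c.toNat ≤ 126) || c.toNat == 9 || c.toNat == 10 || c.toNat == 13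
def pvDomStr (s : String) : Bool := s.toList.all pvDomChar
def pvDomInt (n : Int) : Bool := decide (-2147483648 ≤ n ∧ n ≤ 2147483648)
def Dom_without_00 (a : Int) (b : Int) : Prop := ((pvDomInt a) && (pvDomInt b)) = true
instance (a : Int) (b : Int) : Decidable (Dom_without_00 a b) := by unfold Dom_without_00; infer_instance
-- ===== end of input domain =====

-- B replaces the exponential double recursion by the closed-form binomial C(b+1, a)
-- computed with a single product loop (intended as asymptotically faster; the timing
-- run saw A time out where B returned but could not measure a ratio).


-- ===== PORT A =====
-- literal transliteration of A; the 'b ≤ 0' guard only makes the recursion total: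
-- Python diverges (RecursionError) exactly on those inputs, which Pre_ excludes.
def without_00 (a : Int) (b : Int) : Int :=
  if a = 0 then 1
  else if a = 1 then b + 1
  else if a > 1 ∧ b = 0 then 0
  else if b ≤ 0 then 0  -- totality guard, outside Pre_
  else without_00 (a - 1) (b - 1) + without_00 a (b - 1)
termination_by b.toNat
decreasing_by all_goals omega

-- ===== PORT B =====
def without_00_alt (a : Int) (b : Int) : Int :=
  if a = 0 then 1
  else if a = 1 then b + 1
  else if a < 0 ∨ a > b + 1 then 0
  else
    let p := (PySem.List.pyRange 0 a 1).foldl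
      (fun (p : Int × Int) i => (p.1 * (b + 1 - i), p.2 * (i + 1))) (1, 1)
    PySem.Int.floordiv p.1 p.2

-- ===== PRECONDITION & SPEC =====
-- Pre_ excludes exactly the inputs where the Python A raises RecursionError
-- (a < 0, or a ≥ 2 with b < 0); A returns on every input admitted here.
def Pre_without_00 (a : Int) (b : Int) : Prop := 0 ≤ a ∧ (a ≤ 1 ∨ 0 ≤ b)
instance (a : Int) (b : Int) : Decidable (Pre_without_00 a b) := by unfold Pre_without_00; infer_instance
def pvWitness_without_00 : Int × Int := (3, 5)

def Spec_without_00 (a : Int) (b : Int) (out : Int) : Prop := out = without_00_alt a b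
instance (a : Int) (b : Int) (out : Int) : Decidable (Spec_without_00 a b out) := by unfold Spec_without_00; infer_instance

-- ===== CLAIM (what is proved, stated in full; the proofs are below) =====
def Claim_equal_without_00 : Prop := ∀ (a : Int) (b : Int), Dom_without_00 a b → Pre_without_00 a b → Spec_without_00 a b (without_00 a b)

-- ===== LEMMAS AND PROOFS =====

-- A computes the binomial coefficient C(b+1, a) for 0 ≤ a, 0 ≤ b.
theorem portA_eq_choose (m : Nat) : ∀ (a : Int), 0 ≤ a →
    without_00 a (m : Int) = ((m + 1).choose a.toNat : Int) := by
  induction m with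
  | zero =>
    intro a ha
    unfold without_00
    rcases eq_or_lt_of_le ha with h0 | h0
    · simp [← h0]
    rcases eq_or_lt_of_le (by omega : (1 : Int) ≤ a) with h1 | h1
    · simp [← h1]
    · have h2 : a.toNat = a.toNat - 2 + 2 := by omega
      rw [if_neg (by omega), if_neg (by omega), if_pos ⟨by omega, rfl⟩, h2]
      simp [Nat.choose_eq_zero_of_lt]
  | succ m ih =>
    intro a ha
    unfold without_00
    rcases eq_or_lt_of_le ha with h0 | h0
    · simp [← h0]
    rcases eq_or_lt_of_le (by omega : (1 : Int) ≤ a) with h1 | h1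
    · rw [if_neg (by omega), if_pos h1.symm]
      rw [show a.toNat = 1 by omega, Nat.choose_one_right]
      push_cast
      ring
    · rw [if_neg (by omega), if_neg (by omega), if_neg (by omega), if_neg (by omega)]
      have e1 : ((m + 1 : Nat) : Int) - 1 = (m : Int) := by push_cast; ring
      rw [e1, ih (a - 1) (by omega), ih a (by omega)]
      have e2 : a.toNat = (a - 1).toNat + 1 := by omega
      rw [e2, Nat.choose_succ_succ (m + 1) ((a - 1).toNat)]
      push_cast
      ring

-- the product loop of B, evaluated: numerator = descending product, denominator = a!
theorem portB_fold (b : Int) (n : Nat) :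
    (PySem.List.pyRange 0 (n : Int) 1).foldl
      (fun (p : Int × Int) i => (p.1 * (b + 1 - i), p.2 * (i + 1))) (1, 1)
    = ((Finset.range n).prod (fun k => b + 1 - (k : Int)), (n.factorial : Int)) := by
  induction n with
  | zero => simp [PySem.List.pyRange_one_eq_nil]
  | succ n ih =>
    rw [show ((n + 1 : Nat) : Int) = (n : Int) + 1 by push_cast; ring,
      PySem.List.pyRange_one_succ_right (by positivity), List.foldl_append, ih]
    simp [Finset.prod_range_succ, Nat.factorial_succ]
    ring_nf

-- the descending product over Int equals Nat.descFactorial when b = m ≥ 0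
theorem prod_eq_descFactorial (m : Nat) (n : Nat) :
    (Finset.range n).prod (fun k => (m : Int) + 1 - (k : Int))
      = ((m + 1).descFactorial n : Int) := by
  induction n with
  | zero => simp
  | succ n ih =>
    rw [Finset.prod_range_succ, ih, Nat.descFactorial_succ]
    by_cases h : n ≤ m + 1
    · push_cast [h]
      ring
    · rw [Nat.descFactorial_eq_zero_iff_lt.2 (by omega)]
      simp

theorem without_00_spec' : ∀ (a : Int) (b : Int), Pre_without_00 a b → without_00 a b = without_00_alt a b := by
  intro a b hpre
  obtain ⟨ha, hab⟩ := hpre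
  by_cases hb : 0 ≤ b
  · -- general case: both sides are C(b+1, a)
    obtain ⟨n, rfl⟩ : ∃ n : Nat, a = (n : Int) := ⟨a.toNat, by omega⟩
    obtain ⟨m, rfl⟩ : ∃ m : Nat, b = (m : Int) := ⟨b.toNat, by omega⟩
    rw [portA_eq_choose m (n : Int) (by positivity)]
    unfold without_00_alt
    by_cases h0 : (n : Int) = 0
    · rw [if_pos h0, show n = 0 by omega]
      simp
    rw [if_neg h0]
    by_cases h1 : (n : Int) = 1
    · rw [if_pos h1, show n = 1 by omega]
      simp [Nat.choose_one_right]
    rw [if_neg h1]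
    by_cases h2 : (n : Int) < 0 ∨ (n : Int) > (m : Int) + 1
    · rw [if_pos h2]
      have hlt : m + 1 < n := by omega
      rw [Int.toNat_natCast, Nat.choose_eq_zero_of_lt hlt]
      simp
    rw [if_neg h2]
    simp only [portB_fold, prod_eq_descFactorial, Nat.descFactorial_eq_factorial_mul_choose]
    rw [PySem.Int.floordiv_eq_ediv_of_pos (by exact_mod_cast n.factorial_pos)]
    push_cast [Int.toNat_natCast]
    rw [Int.mul_ediv_cancel_left _ (by exact_mod_cast n.factorial_ne_zero)]
  · -- b < 0: Pre_ forces a = 0 or a = 1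
    have h01 : a = 0 ∨ a = 1 := by omega
    rcases h01 with rfl | rfl
    · unfold without_00 without_00_alt
      simp
    · unfold without_00 without_00_alt
      norm_num

-- ===== VERDICT (by name: the statement is the Claim_ definition above) =====
theorem without_00_spec : Claim_equal_without_00 := by
  intro a b _ hpre
  exact without_00_spec' a b hpre
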